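-- pv_equiv track=rewrite | github.com/kartikbandarwad99/Product_Hunt | helper_funcs.py | build_ngram_dataset
-- ===== SOURCE A (Python) =====
-- def build_ngram_dataset(data,stoi,context_window = 3):
--     xs = []
--     ys = []
--     for w in data:
--         w = list(w) + ['<end>']
--         context = ['<start>'] * context_window
--         for i in range(len(w)):
--             xs.append([stoi[token] for token in context])
--             ys.append(stoi[w[i]])
--             context = context[1:] + [w[i]]
--     return xs,ys
-- ===== SOURCE B (Python) =====
-- def build_ngram_dataset(data, stoi, context_window=3):
--     k = max(context_window, 0)
--     xs = []
--     ys = []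
--     for w in data:
--         padded = ['<start>'] * k + list(w) + ['<end>']
--         ids = [stoi[t] for t in padded]
--         for i in range(len(w) + 1):
--             xs.append(ids[i:i + k])
--             ys.append(ids[i + k])
--     return xs, ys
-- ===== Notes on version B (the rewrite author's own statement) =====
-- stated objective: alternative
-- what changed: B precomputes the fully padded token sequence per word and maps it to ids once, then emits fixed-width slices ids[i:i+k] and targets ids[i+k], instead of A's rolling context list that is re-looked-up in stoi and rebuilt (context[1:]+[t]) at every step.
-- intended difference: For context_window <= 0 with at least one nonempty word, A's context rows after the first position of a word are one-element lists [id of previous token] because context[1:]+[t] on an empty list grows it to length 1; B returns the intended empty context rows for a non-positive window. — e.g. on build_ngram_dataset(["ab"], [("a", 0), ("b", 1), ("<end>", 2)], 0): A returns ([[], [0], [1]], [0, 1, 2]), B returns ([[], [], []], [0, 1, 2])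
import Mathlib
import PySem

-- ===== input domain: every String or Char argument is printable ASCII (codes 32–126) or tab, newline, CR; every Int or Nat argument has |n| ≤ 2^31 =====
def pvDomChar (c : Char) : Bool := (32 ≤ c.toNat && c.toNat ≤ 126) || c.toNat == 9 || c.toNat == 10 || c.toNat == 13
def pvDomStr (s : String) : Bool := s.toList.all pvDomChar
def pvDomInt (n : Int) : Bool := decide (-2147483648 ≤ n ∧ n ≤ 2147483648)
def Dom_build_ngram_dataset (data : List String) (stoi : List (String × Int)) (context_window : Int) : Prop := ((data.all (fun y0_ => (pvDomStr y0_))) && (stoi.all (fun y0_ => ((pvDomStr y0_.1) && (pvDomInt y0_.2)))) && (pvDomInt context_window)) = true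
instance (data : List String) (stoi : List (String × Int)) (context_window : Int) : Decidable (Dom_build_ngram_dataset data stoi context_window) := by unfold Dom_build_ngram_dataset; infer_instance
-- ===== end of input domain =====

-- B builds the padded token/id array per word once and takes fixed-width slices, instead of A's
-- rolling context list (objective: alternative decomposition; for context_window ≤ 0 B returns the
-- intended empty context rows where A's rolling list accidentally grows to one element — see D_).

-- ===== PORT A =====
-- stoi[token]: Python dict lookup; the default 0 is unreachable inside Pre_ (Python raises KeyError outside it)
def pvLookup (stoi : List (String × Int)) (t : String) : Int :=
  (PySem.Dict.ofList stoi).getD t 0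

-- one iteration of A's inner loop over state ((xs, ys), context) and token w[i]
def pvStepA (stoi : List (String × Int)) (st : (List (List Int) × List Int) × List String)
    (t : String) : (List (List Int) × List Int) × List String :=
  ((st.1.1 ++ [st.2.map (pvLookup stoi)], st.1.2 ++ [pvLookup stoi t]),
   PySem.List.slice st.2 (some 1) none ++ [t])

def build_ngram_dataset (data : List String) (stoi : List (String × Int)) (context_window : Int) :
    List (List Int) × List Int :=
  data.foldl (fun acc w =>
    let wl := w.toList.map (fun c => String.ofList [c]) ++ ["<end>"]   -- w = list(w) + ['<end>']
    ((PySem.List.pyRange 0 ((wl.length : Int)) 1).foldl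
        (fun st j => pvStepA stoi st (PySem.List.pyGetD wl j ""))
        (acc, PySem.List.pyRepeat ["<start>"] context_window)).1)
    ([], [])

-- ===== PORT B =====
def build_ngram_dataset_alt (data : List String) (stoi : List (String × Int)) (context_window : Int) :
    List (List Int) × List Int :=
  let k := max context_window 0
  data.foldl (fun acc w =>
    let padded := PySem.List.pyRepeat ["<start>"] k ++ w.toList.map (fun c => String.ofList [c]) ++ ["<end>"]
    let ids := padded.map (pvLookup stoi)
    (PySem.List.pyRange 0 (PySem.Str.len w + 1) 1).foldl
        (fun acc i => (acc.1 ++ [PySem.List.slice ids (some i) (some (i + k))],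
                       acc.2 ++ [PySem.List.pyGetD ids (i + k) 0]))
        acc)
    ([], [])

-- ===== PRECONDITION & SPEC =====
-- Pre_: every token the loops look up ('<end>' and each character of each word; '<start>' when the
-- window is positive and data nonempty) is a key of stoi; outside Pre_ Python raises KeyError.
def Pre_build_ngram_dataset (data : List String) (stoi : List (String × Int)) (context_window : Int) : Prop :=
  ((data.isEmpty || ((PySem.Dict.ofList stoi).contains "<end>"
      && (decide (context_window ≤ 0) || (PySem.Dict.ofList stoi).contains "<start>")))
   && data.all (fun w => w.toList.all (fun c => (PySem.Dict.ofList stoi).contains (String.ofList [c])))) = true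
instance (data : List String) (stoi : List (String × Int)) (context_window : Int) : Decidable (Pre_build_ngram_dataset data stoi context_window) := by unfold Pre_build_ngram_dataset; infer_instance

def pvWitness_build_ngram_dataset : List String × (List (String × Int)) × Int :=
  (["ab"], [("a", 0), ("b", 1), ("<end>", 2), ("<start>", 3)], 2)

-- For context_window ≤ 0 with some nonempty word, A returns one-element context rows [id of the
-- previous token] after each word's first position (context[1:]+[t] on [] grows it), while B
-- returns the intended empty context rows for a non-positive window.
def D_build_ngram_dataset (data : List String) (stoi : List (String × Int)) (context_window : Int) : Prop :=
  context_window ≤ 0 ∧ ∃ w ∈ data, w ≠ ""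
instance (data : List String) (stoi : List (String × Int)) (context_window : Int) : Decidable (D_build_ngram_dataset data stoi context_window) := by unfold D_build_ngram_dataset; infer_instance

def Spec_build_ngram_dataset (data : List String) (stoi : List (String × Int)) (context_window : Int) (out : List (List Int) × List Int) : Prop := ¬ D_build_ngram_dataset data stoi context_window → out = build_ngram_dataset_alt data stoi context_window
instance (data : List String) (stoi : List (String × Int)) (context_window : Int) (out : List (List Int) × List Int) : Decidable (Spec_build_ngram_dataset data stoi context_window out) := by unfold Spec_build_ngram_dataset; infer_instance

def pvDiffWitness_build_ngram_dataset : List String × (List (String × Int)) × Int :=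
  (["ab"], [("a", 0), ("b", 1), ("<end>", 2)], 0)
def pvDiffWitnessOut_build_ngram_dataset : (List (List Int) × List Int) × (List (List Int) × List Int) :=
  (([[], [0], [1]], [0, 1, 2]), ([[], [], []], [0, 1, 2]))

-- ===== CLAIM (what is proved, stated in full; the proofs are below) =====
def Claim_unchanged_build_ngram_dataset : Prop := ∀ (data : List String) (stoi : List (String × Int)) (context_window : Int), Dom_build_ngram_dataset data stoi context_window → Pre_build_ngram_dataset data stoi context_window → Spec_build_ngram_dataset data stoi context_window (build_ngram_dataset data stoi context_window)
def Claim_changed_build_ngram_dataset : Prop := Dom_build_ngram_dataset (pvDiffWitness_build_ngram_dataset.1) (pvDiffWitness_build_ngram_dataset.2.1) (pvDiffWitness_build_ngram_dataset.2.2) ∧ Pre_build_ngram_dataset (pvDiffWitness_build_ngram_dataset.1) (pvDiffWitness_build_ngram_dataset.2.1) (pvDiffWitness_build_ngram_dataset.2.2) ∧ D_build_ngram_dataset (pvDiffWitness_build_ngram_dataset.1) (pvDiffWitness_build_ngram_dataset.2.1) (pvDiffWitness_build_ngram_dataset.2.2) ∧ build_ngram_dataset (pvDiffWitness_build_ngram_dataset.1)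 (pvDiffWitness_build_ngram_dataset.2.1) (pvDiffWitness_build_ngram_dataset.2.2) = pvDiffWitnessOut_build_ngram_dataset.1 ∧ build_ngram_dataset_alt (pvDiffWitness_build_ngram_dataset.1) (pvDiffWitness_build_ngram_dataset.2.1) (pvDiffWitness_build_ngram_dataset.2.2) = pvDiffWitnessOut_build_ngram_dataset.2 ∧ pvDiffWitnessOut_build_ngram_dataset.1 ≠ pvDiffWitnessOut_build_ngram_dataset.2

def Claim_exact_build_ngram_dataset : Prop := ∀ (data : List String) (stoi : List (String × Int)) (context_window : Int), Dom_build_ngram_dataset data stoi context_window → Pre_build_ngram_dataset data stoi context_window → D_build_ngram_dataset data stoi context_window → build_ngram_dataset data stoi context_window ≠ build_ngram_dataset_alt data stoi context_window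

-- ===== LEMMAS AND PROOFS =====

theorem pv_rangeNat (n : Nat) :
    PySem.List.pyRange 0 (n : Int) 1 = List.map (fun j : Nat => (j : Int)) (List.range n) := by
  rw [PySem.List.pyRange_one]
  simp only [Int.sub_zero, Int.toNat_natCast]
  exact List.map_congr_left (fun j _ => Int.zero_add _)

-- core invariant: A's rolling context after n steps is the width-k window of the padded list at n,
-- and the (xs, ys) accumulators agree with B's slice-based fold
theorem pv_roll (f : String → Int) (wl : List String) (k : Nat) (hk : 1 ≤ k) :
    ∀ n, n ≤ wl.length → ∀ xs ys,
    (List.range n).foldl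
        (fun st j => ((st.1.1 ++ [st.2.map f], st.1.2 ++ [f (wl.getD j "")]),
                      PySem.List.slice st.2 (some 1) none ++ [wl.getD j ""]))
        ((xs, ys), List.replicate k "<start>")
    = ((List.range n).foldl
        (fun acc j => (acc.1 ++ [(((List.replicate k "<start>" ++ wl).map f).drop j).take k],
                       acc.2 ++ [((List.replicate k "<start>" ++ wl).map f).getD (j + k) 0]))
        (xs, ys),
       ((List.replicate k "<start>" ++ wl).drop n).take k) := by
  intro n
  induction n with
  | zero =>
      intro _ xs ys
      simp [List.take_left']
  | succ n ih =>
      intro hn xs ys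
      have hn' : n < wl.length := by omega
      set P := List.replicate k "<start>" ++ wl with hPdef
      have hP : P.length = k + wl.length := by simp [hPdef]
      rw [List.range_succ, List.foldl_append, List.foldl_append, ih (by omega)]
      simp only [List.foldl_cons, List.foldl_nil]
      have hx : wl[n]? = some wl[n] := by simp [hn']
      have hPx : P[n + k]? = some wl[n] := by
        rw [hPdef, List.getElem?_append_right (by simp)]
        simpa using hx
      have hwl : wl.getD n "" = wl[n] := List.getD_eq_getElem wl "" hn'
      refine Prod.ext (Prod.ext ?_ ?_) ?_
      · -- xs entry: the mapped context is the id-array slice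
        simp [List.map_take, List.map_drop]
      · -- ys entry
        have h1 : (P.map f).getD (n + k) 0 = f wl[n] := by
          rw [List.getD_eq_getElem?_getD, List.getElem?_map, hPx]
          rfl
        rw [hwl, h1]
      · -- context update
        rw [PySem.List.slice_from_one]
        have htail : ((P.drop n).take k).tail = (P.drop (n + 1)).take (k - 1) := by
          rw [← List.drop_one, List.drop_take, List.drop_drop]
        have hQ : (P.drop (n + 1))[k - 1]? = some wl[n] := by
          rw [List.getElem?_drop, show n + 1 + (k - 1) = n + k by omega, hPx]
        have hstep : (P.drop (n + 1)).take k = (P.drop (n + 1)).take (k - 1) ++ [wl[n]] := by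
          rw [show k = (k - 1) + 1 by omega, List.take_add_one, hQ]
          rfl
        rw [htail, hwl, hstep]

-- per-word equality for a positive window (stated let-free; matches the ports up to zeta)
theorem pv_word_pos (stoi : List (String × Int)) (cw : Int) (hcw : 0 < cw)
    (w : String) (acc : List (List Int) × List Int) :
    ((PySem.List.pyRange 0 (((w.toList.map (fun c => String.ofList [c]) ++ ["<end>"]).length : Int)) 1).foldl
        (fun st j => pvStepA stoi st (PySem.List.pyGetD (w.toList.map (fun c => String.ofList [c]) ++ ["<end>"]) j ""))
        (acc, PySem.List.pyRepeat ["<start>"] cw)).1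
    = (PySem.List.pyRange 0 (PySem.Str.len w + 1) 1).foldl
        (fun a i => (a.1 ++ [PySem.List.slice ((PySem.List.pyRepeat ["<start>"] (max cw 0) ++ w.toList.map (fun c => String.ofList [c]) ++ ["<end>"]).map (pvLookup stoi)) (some i) (some (i + max cw 0))],
                     a.2 ++ [PySem.List.pyGetD ((PySem.List.pyRepeat ["<start>"] (max cw 0) ++ w.toList.map (fun c => String.ofList [c]) ++ ["<end>"]).map (pvLookup stoi)) (i + max cw 0) 0]))
        acc := by
  obtain ⟨a1, a2⟩ := acc
  have hmax : max cw 0 = cw := by omega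
  obtain ⟨k, hk⟩ : ∃ k : Nat, cw = (k : Int) := ⟨cw.toNat, by omega⟩
  subst hk
  have hk0 : 0 < k := by exact_mod_cast hcw
  have hk1 : 1 ≤ k := hk0
  rw [hmax, PySem.List.pyRepeat_singleton, Int.toNat_natCast]
  simp only [List.append_assoc]
  set wl := w.toList.map (fun c => String.ofList [c]) ++ ["<end>"] with hwl
  have hlenB : PySem.Str.len w + 1 = ((wl.length : Nat) : Int) := by
    have : wl.length = w.toList.length + 1 := by simp [hwl]
    rw [this, PySem.Str.len_eq]
    push_cast
    ring
  rw [hlenB, pv_rangeNat, List.foldl_map, List.foldl_map]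
  simp only [pvStepA, PySem.List.pyGetD_natCast, PySem.List.slice_natCast_add]
  simp only [← Int.natCast_add, PySem.List.pyGetD_natCast]
  rw [pv_roll (pvLookup stoi) wl k hk1 wl.length (le_refl _) a1 a2]

-- per-word equality for a non-positive window and the empty word
theorem pv_word_empty (stoi : List (String × Int)) (cw : Int) (hcw : cw ≤ 0)
    (acc : List (List Int) × List Int) :
    ((PySem.List.pyRange 0 (((("" : String).toList.map (fun c => String.ofList [c]) ++ ["<end>"]).length : Int)) 1).foldl
        (fun st j => pvStepA stoi st (PySem.List.pyGetD (("" : String).toList.map (fun c => String.ofList [c]) ++ ["<end>"]) j ""))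
        (acc, PySem.List.pyRepeat ["<start>"] cw)).1
    = (PySem.List.pyRange 0 (PySem.Str.len "" + 1) 1).foldl
        (fun a i => (a.1 ++ [PySem.List.slice ((PySem.List.pyRepeat ["<start>"] (max cw 0) ++ ("" : String).toList.map (fun c => String.ofList [c]) ++ ["<end>"]).map (pvLookup stoi)) (some i) (some (i + max cw 0))],
                     a.2 ++ [PySem.List.pyGetD ((PySem.List.pyRepeat ["<start>"] (max cw 0) ++ ("" : String).toList.map (fun c => String.ofList [c]) ++ ["<end>"]).map (pvLookup stoi)) (i + max cw 0) 0]))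
        acc := by
  obtain ⟨a1, a2⟩ := acc
  have hmax : max cw 0 = 0 := by omega
  have hrep : PySem.List.pyRepeat ["<start>"] cw = ([] : List String) := by
    rw [PySem.List.pyRepeat_singleton, Int.toNat_of_nonpos hcw]
    rfl
  have hlen0 : PySem.Str.len "" = 0 := by
    rw [PySem.Str.len_eq]
    rfl
  have hr1 : PySem.List.pyRange 0 1 1 = [0] := by decide
  simp only [hmax, hrep, hlen0]
  norm_num [hr1, pvStepA]
  simp [PySem.List.slice_to]


-- ----- tightness: inside D_ the two results differ everywhere -----

theorem pv_slice_self (xs : List Int) (i : Int) :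
    PySem.List.slice xs (some i) (some i) = [] := by
  apply List.eq_nil_of_length_eq_zero
  rw [PySem.List.length_slice]
  omega

-- membership in the first component of an append-shaped fold
theorem pv_mem_fst_fold (L : List Int) (e : Int → List Int) (g : Int → Int) :
    ∀ (acc : List (List Int) × List Int) (r : List Int),
      r ∈ (L.foldl (fun a i => (a.1 ++ [e i], a.2 ++ [g i])) acc).1 →
      r ∈ acc.1 ∨ ∃ i, r = e i := by
  induction L with
  | nil =>
      intro acc r h
      exact Or.inl h
  | cons x L ih =>
      intro acc r h
      simp only [List.foldl_cons] at h
      rcases ih _ r h with h' | ⟨i, he⟩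
      · rcases List.mem_append.mp h' with h'' | h''
        · exact Or.inl h''
        · exact Or.inr ⟨x, by simpa using h''⟩
      · exact Or.inr ⟨i, he⟩

-- with a non-positive window every context row B produces is empty
theorem pv_B_nil (stoi : List (String × Int)) (cw : Int) (hcw : cw ≤ 0) :
    ∀ (data : List String) (acc : List (List Int) × List Int),
      (∀ r ∈ acc.1, r = []) →
      ∀ r ∈ (data.foldl (fun acc w =>
          (PySem.List.pyRange 0 (PySem.Str.len w + 1) 1).foldl
            (fun a i => (a.1 ++ [PySem.List.slice ((PySem.List.pyRepeat ["<start>"] (max cw 0) ++ w.toList.map (fun c => String.ofList [c]) ++ ["<end>"]).map (pvLookup stoi)) (some i) (some (i + max cw 0))],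
                         a.2 ++ [PySem.List.pyGetD ((PySem.List.pyRepeat ["<start>"] (max cw 0) ++ w.toList.map (fun c => String.ofList [c]) ++ ["<end>"]).map (pvLookup stoi)) (i + max cw 0) 0]))
            acc) acc).1, r = [] := by
  have hmax : max cw 0 = 0 := by omega
  intro data
  induction data with
  | nil => intro acc hacc r hr; exact hacc r hr
  | cons w data ih =>
      intro acc hacc r hr
      simp only [List.foldl_cons] at hr
      refine ih _ ?_ r hr
      intro r' hr'
      rcases pv_mem_fst_fold _ _ _ acc r' hr' with h | ⟨i, he⟩
      · exact hacc r' h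
      · rw [he, hmax, add_zero, pv_slice_self]

-- every step of A's inner loop appends to xs; so xs only grows
theorem pv_inner_prefix (stoi : List (String × Int)) (wl : List String) :
    ∀ (L : List Int) (st : (List (List Int) × List Int) × List String),
      ∃ t, (L.foldl (fun st j => pvStepA stoi st (PySem.List.pyGetD wl j "")) st).1.1
           = st.1.1 ++ t := by
  intro L
  induction L with
  | nil => exact fun st => ⟨[], by simp⟩
  | cons x L ih =>
      intro st
      obtain ⟨t, ht⟩ := ih (pvStepA stoi st (PySem.List.pyGetD wl x ""))
      refine ⟨[st.2.map (pvLookup stoi)] ++ t, ?_⟩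
      simp only [List.foldl_cons]
      rw [ht]
      simp [pvStepA]

-- xs only grows across A's outer loop as well
theorem pv_A_prefix (stoi : List (String × Int)) (cw : Int) :
    ∀ (data : List String) (acc : List (List Int) × List Int),
      ∃ t, (data.foldl (fun acc w =>
          ((PySem.List.pyRange 0 (((w.toList.map (fun c => String.ofList [c]) ++ ["<end>"]).length : Int)) 1).foldl
            (fun st j => pvStepA stoi st (PySem.List.pyGetD (w.toList.map (fun c => String.ofList [c]) ++ ["<end>"]) j ""))
            (acc, PySem.List.pyRepeat ["<start>"] cw)).1) acc).1
        = acc.1 ++ t := by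
  intro data
  induction data with
  | nil => exact fun acc => ⟨[], by simp⟩
  | cons w data ih =>
      intro acc
      set wl := w.toList.map (fun c => String.ofList [c]) ++ ["<end>"] with hwl
      obtain ⟨t1, ht1⟩ := pv_inner_prefix stoi wl (PySem.List.pyRange 0 ((wl.length : Int)) 1)
        (acc, PySem.List.pyRepeat ["<start>"] cw)
      obtain ⟨t2, ht2⟩ := ih (((PySem.List.pyRange 0 ((wl.length : Int)) 1).foldl
            (fun st j => pvStepA stoi st (PySem.List.pyGetD wl j ""))
            (acc, PySem.List.pyRepeat ["<start>"] cw)).1)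
      refine ⟨t1 ++ t2, ?_⟩
      simp only [List.foldl_cons]
      rw [ht2, ht1]
      simp

-- with a non-positive window, A's second row for a nonempty word is the one-element list [id of w[0]]
theorem pv_A_nonnil (stoi : List (String × Int)) (cw : Int) (hcw : cw ≤ 0) :
    ∀ (data : List String), (∃ w ∈ data, w ≠ "") → ∀ (acc : List (List Int) × List Int),
      ∃ r ∈ (data.foldl (fun acc w =>
          ((PySem.List.pyRange 0 (((w.toList.map (fun c => String.ofList [c]) ++ ["<end>"]).length : Int)) 1).foldl
            (fun st j => pvStepA stoi st (PySem.List.pyGetD (w.toList.map (fun c => String.ofList [c]) ++ ["<end>"]) j ""))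
            (acc, PySem.List.pyRepeat ["<start>"] cw)).1) acc).1, r ≠ [] := by
  have hrep : PySem.List.pyRepeat ["<start>"] cw = ([] : List String) := by
    rw [PySem.List.pyRepeat_singleton, Int.toNat_of_nonpos hcw]
    rfl
  intro data
  induction data with
  | nil => intro h; exact absurd h (by simp)
  | cons w data ih =>
      intro hex acc
      by_cases hw : w = ""
      · obtain ⟨w', hw', hne⟩ := hex
        rcases List.mem_cons.mp hw' with h | h
        · exact absurd (h ▸ hw) hne
        · obtain ⟨r, hr, hrne⟩ := ih ⟨w', h, hne⟩ (((PySem.List.pyRange 0 (((w.toList.map (fun c => String.ofList [c]) ++ ["<end>"]).length : Int)) 1).foldl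
              (fun st j => pvStepA stoi st (PySem.List.pyGetD (w.toList.map (fun c => String.ofList [c]) ++ ["<end>"]) j ""))
              (acc, PySem.List.pyRepeat ["<start>"] cw)).1)
          exact ⟨r, by simpa [List.foldl_cons] using hr, hrne⟩
      · -- the first processed nonempty word already yields the row [id of w[0]]
        set wl := w.toList.map (fun c => String.ofList [c]) ++ ["<end>"] with hwl
        have htl : w.toList ≠ [] := fun hnil => hw (by rw [← String.ofList_toList (s := w), hnil])
        have hn : 1 ≤ w.toList.length := List.length_pos_of_ne_nil htl
        have hlen : wl.length = w.toList.length + 1 := by simp [hwl]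
        have hrange : PySem.List.pyRange 0 ((wl.length : Int)) 1
            = 0 :: 1 :: PySem.List.pyRange 2 ((wl.length : Int)) 1 := by
          rw [PySem.List.pyRange_one_cons (by rw [hlen]; push_cast; omega)]
          norm_num
          rw [PySem.List.pyRange_one_cons (by rw [hlen]; push_cast; omega)]
          norm_num
        obtain ⟨t1, ht1⟩ := pv_inner_prefix stoi wl (PySem.List.pyRange 2 ((wl.length : Int)) 1)
          (pvStepA stoi (pvStepA stoi (acc, PySem.List.pyRepeat ["<start>"] cw) (PySem.List.pyGetD wl 0 "")) (PySem.List.pyGetD wl 1 ""))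
        obtain ⟨t2, ht2⟩ := pv_A_prefix stoi cw data (((PySem.List.pyRange 0 ((wl.length : Int)) 1).foldl
              (fun st j => pvStepA stoi st (PySem.List.pyGetD wl j ""))
              (acc, PySem.List.pyRepeat ["<start>"] cw)).1)
        refine ⟨[pvLookup stoi (PySem.List.pyGetD wl 0 "")], ?_, by simp⟩
        simp only [List.foldl_cons]
        rw [ht2, hrange]
        simp only [List.foldl_cons]
        rw [ht1]
        simp [pvStepA, hrep, PySem.List.slice_from_one]

-- ===== VERDICT =====
theorem build_ngram_dataset_spec : Claim_unchanged_build_ngram_dataset := by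
  intro data stoi cw _ _
  unfold Spec_build_ngram_dataset
  intro hnd
  simp only [build_ngram_dataset, build_ngram_dataset_alt]
  rcases lt_or_ge 0 cw with hpos | hnp
  · apply PySem.List.foldl_congr_mem
    intro acc w _
    exact pv_word_pos stoi cw hpos w acc
  · have hall : ∀ w ∈ data, w = "" := by
      intro w hw
      by_contra hne
      exact hnd ⟨hnp, w, hw, hne⟩
    apply PySem.List.foldl_congr_mem
    intro acc w hw
    rw [hall w hw]
    exact pv_word_empty stoi cw hnp acc

set_option maxRecDepth 4000 in
theorem build_ngram_dataset_changed : Claim_changed_build_ngram_dataset := by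
  unfold Claim_changed_build_ngram_dataset
  refine ⟨?g1, ?g2, ?g3, ?g4, ?g5, ?g6⟩
  case g1 => decide
  case g2 => decide
  case g3 => decide
  case g4 => decide
  case g5 => decide
  case g6 => decide

theorem build_ngram_dataset_tight : Claim_exact_build_ngram_dataset := by
  intro data stoi cw _ _ hD heq
  obtain ⟨hcw, hex⟩ := hD
  have hA : ∃ r ∈ (build_ngram_dataset data stoi cw).1, r ≠ [] := by
    simp only [build_ngram_dataset]
    exact pv_A_nonnil stoi cw hcw data hex ([], [])
  have hB : ∀ r ∈ (build_ngram_dataset_alt data stoi cw).1, r = [] := by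
    simp only [build_ngram_dataset_alt]
    exact pv_B_nil stoi cw hcw data ([], []) (by simp)
  obtain ⟨r, hr, hne⟩ := hA
  exact hne (hB r (heq ▸ hr))
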